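-- pv_equiv track=rewrite | github.com/jyterencekim/jyterencekim.github.io | scripts/spotify-playlist.py | split_titles
-- ===== SOURCE A (Python) =====
-- def split_titles(titles_str):
--     """Split comma-separated titles, being careful with parenthetical content."""
--     titles = []
--     depth = 0
--     current = ""
--     for ch in titles_str:
--         if ch == "(":
--             depth += 1
--         elif ch == ")":
--             depth -= 1
--         elif ch == "," and depth == 0:
--             titles.append(current.strip())
--             current = ""
--             continue
--         current += ch
--     if current.strip():
--         titles.append(current.strip())
--     return titles
-- ===== SOURCE B (Python) =====
-- def split_titles(titles_str):
--     """Two-phase split: collect depth-0 comma positions, then slice and strip."""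
--     depth = 0
--     points = []
--     for i, ch in enumerate(titles_str):
--         if ch == "(":
--             depth += 1
--         elif ch == ")":
--             depth -= 1
--         elif ch == "," and depth == 0:
--             points.append(i)
--     segments = []
--     start = 0
--     for p in points:
--         segments.append(titles_str[start:p].strip())
--         start = p + 1
--     last = titles_str[start:].strip()
--     return segments + ([last] if last else [])
-- ===== Notes on version B (the rewrite author's own statement) =====
-- stated objective: alternative
-- what changed: Instead of accumulating each segment character by character in a growing buffer during the depth scan, B first collects the indices of all depth-0 commas, then slices the original string at those split points and strips each slice, keeping all-but-last slices unconditionally and the last only if non-empty.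
import Mathlib
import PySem

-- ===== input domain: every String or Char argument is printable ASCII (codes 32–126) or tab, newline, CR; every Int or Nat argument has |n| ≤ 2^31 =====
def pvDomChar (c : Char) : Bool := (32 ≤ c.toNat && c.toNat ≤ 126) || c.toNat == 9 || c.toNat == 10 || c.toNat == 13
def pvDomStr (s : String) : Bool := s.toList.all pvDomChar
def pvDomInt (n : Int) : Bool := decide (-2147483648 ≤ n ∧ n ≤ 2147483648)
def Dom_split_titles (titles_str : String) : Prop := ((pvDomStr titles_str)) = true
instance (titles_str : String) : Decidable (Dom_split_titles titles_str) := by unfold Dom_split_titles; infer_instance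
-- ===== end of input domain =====

-- B changes the decomposition: a split-point index pass followed by a slicing pass, instead of
-- A's single pass that grows the current segment character by character (objective: alternative).

-- ===== PORT A =====
def split_titles (titles_str : String) : List String :=
  let fin := titles_str.toList.foldl
    (fun (st : List (List Char) × Int × List Char) ch =>
      if ch = '(' then (st.1, st.2.1 + 1, st.2.2 ++ [ch])
      else if ch = ')' then (st.1, st.2.1 - 1, st.2.2 ++ [ch])
      else if ch = ',' ∧ st.2.1 = 0 then (st.1 ++ [PySem.Chars.strip st.2.2], st.2.1, [])
      else (st.1, st.2.1, st.2.2 ++ [ch]))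
    ([], 0, [])
  let titles := if PySem.Chars.strip fin.2.2 ≠ [] then fin.1 ++ [PySem.Chars.strip fin.2.2] else fin.1
  titles.map String.mk

-- ===== PORT B =====
def split_titles_alt (titles_str : String) : List String :=
  let cs := titles_str.toList
  let points := ((PySem.List.enumerate cs 0).foldl
    (fun (st : Int × List Int) p =>
      if p.2 = '(' then (st.1 + 1, st.2)
      else if p.2 = ')' then (st.1 - 1, st.2)
      else if p.2 = ',' ∧ st.1 = 0 then (st.1, st.2 ++ [p.1])
      else st) ((0 : Int), [])).2
  let fin := points.foldl
    (fun (st : List (List Char) × Int) p =>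
      (st.1 ++ [PySem.Chars.strip (PySem.List.slice cs (some st.2) (some p))], p + 1))
    ([], (0 : Int))
  let last := PySem.Chars.strip (PySem.List.slice cs (some fin.2) none)
  (fin.1 ++ if last ≠ [] then [last] else []).map String.mk

-- ===== PRECONDITION & SPEC =====
def Spec_split_titles (titles_str : String) (out : List String) : Prop := out = split_titles_alt titles_str
instance (titles_str : String) (out : List String) : Decidable (Spec_split_titles titles_str out) := by unfold Spec_split_titles; infer_instance

-- ===== CLAIM (what is proved, stated in full; the proofs are below) =====
def Claim_equal_split_titles : Prop := ∀ (titles_str : String), Dom_split_titles titles_str → Spec_split_titles titles_str (split_titles titles_str)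

-- ===== LEMMAS AND PROOFS =====

-- depth update for one character
def pvUpd (c : Char) (d : Int) : Int := if c = '(' then d + 1 else if c = ')' then d - 1 else d

def pvDepth (d : Int) : List Char → Int
  | [] => d
  | c :: cs => pvDepth (pvUpd c d) cs

-- reference segmentation: (first segment, remaining segments)
def pvSegs (d : Int) : List Char → List Char × List (List Char)
  | [] => ([], [])
  | c :: cs =>
    if c = ',' ∧ d = 0 then ([], (pvSegs 0 cs).1 :: (pvSegs 0 cs).2)
    else (c :: (pvSegs (pvUpd c d) cs).1, (pvSegs (pvUpd c d) cs).2)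

-- depth-0 comma indices, base k
def pvPts (d : Int) (k : Nat) : List Char → List Int
  | [] => []
  | c :: cs =>
    if c = ',' ∧ d = 0 then (k : Int) :: pvPts 0 (k + 1) cs
    else pvPts (pvUpd c d) (k + 1) cs

def pvInit (f : List Char) (r : List (List Char)) : List (List Char) :=
  match r with
  | [] => []
  | g :: r' => f :: pvInit g r'

def pvLast (f : List Char) (r : List (List Char)) : List Char :=
  match r with
  | [] => f
  | g :: r' => pvLast g r'

theorem lemA (cs : List Char) : ∀ (d : Int) (titles : List (List Char)) (cur : List Char),
    cs.foldl
      (fun (st : List (List Char) × Int × List Char) ch =>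
        if ch = '(' then (st.1, st.2.1 + 1, st.2.2 ++ [ch])
        else if ch = ')' then (st.1, st.2.1 - 1, st.2.2 ++ [ch])
        else if ch = ',' ∧ st.2.1 = 0 then (st.1 ++ [PySem.Chars.strip st.2.2], st.2.1, [])
        else (st.1, st.2.1, st.2.2 ++ [ch]))
      (titles, d, cur)
    = (titles ++ (pvInit (cur ++ (pvSegs d cs).1) (pvSegs d cs).2).map PySem.Chars.strip,
       pvDepth d cs,
       pvLast (cur ++ (pvSegs d cs).1) (pvSegs d cs).2) := by
  induction cs with
  | nil => intro d titles cur; simp [pvSegs, pvDepth, pvInit, pvLast]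
  | cons c cs ih =>
    intro d titles cur
    by_cases hp : c = '('
    · subst hp
      simp only [List.foldl_cons]
      rw [ih]
      simp [pvSegs, pvDepth, pvUpd]
    · by_cases hq : c = ')'
      · subst hq
        simp only [List.foldl_cons, if_neg (show ¬(')' = '(') by decide)]
        rw [ih]
        simp [pvSegs, pvDepth, pvUpd, hp]
      · by_cases hc : c = ',' ∧ d = 0
        · obtain ⟨hc1, hc2⟩ := hc; subst hc1; subst hc2
          simp only [List.foldl_cons, if_neg (show ¬(',' = '(') by decide),
            if_neg (show ¬(',' = ')') by decide)]
          rw [ih]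
          simp [pvSegs, pvDepth, pvUpd, pvInit, pvLast]
        · simp only [List.foldl_cons, if_neg hp, if_neg hq, if_neg hc]
          rw [ih]
          have hu : pvUpd c d = d := by simp [pvUpd, hp, hq]
          simp [pvSegs, pvDepth, hc, hu]

theorem lemP (cs : List Char) : ∀ (d : Int) (k : Nat) (pts : List Int),
    (PySem.List.enumerate cs (k : Int)).foldl
      (fun (st : Int × List Int) p =>
        if p.2 = '(' then (st.1 + 1, st.2)
        else if p.2 = ')' then (st.1 - 1, st.2)
        else if p.2 = ',' ∧ st.1 = 0 then (st.1, st.2 ++ [p.1])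
        else st) (d, pts)
    = (pvDepth d cs, pts ++ pvPts d k cs) := by
  induction cs with
  | nil => intro d k pts; simp [PySem.List.enumerate_nil, pvDepth, pvPts]
  | cons c cs ih =>
    intro d k pts
    rw [PySem.List.enumerate_cons]
    have hk1 : (k : Int) + 1 = ((k + 1 : Nat) : Int) := by push_cast; ring
    by_cases hp : c = '('
    · subst hp
      simp only [List.foldl_cons]
      rw [hk1, ih]
      simp [pvDepth, pvPts, pvUpd]
    · by_cases hq : c = ')'
      · subst hq
        simp only [List.foldl_cons, if_neg (show ¬(')' = '(') by decide)]
        rw [hk1, ih]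
        simp [pvDepth, pvPts, pvUpd, hp]
      · by_cases hc : c = ',' ∧ d = 0
        · obtain ⟨hc1, hc2⟩ := hc; subst hc1; subst hc2
          simp only [List.foldl_cons, if_neg (show ¬(',' = '(') by decide),
            if_neg (show ¬(',' = ')') by decide)]
          rw [hk1, ih]
          simp [pvDepth, pvPts, pvUpd]
        · simp only [List.foldl_cons, if_neg hp, if_neg hq, if_neg hc]
          rw [hk1, ih]
          have hu : pvUpd c d = d := by simp [pvUpd, hp, hq]
          simp [pvDepth, pvPts, hc, hu]

theorem lemS (orig : List Char) (cs : List Char) :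
    ∀ (d : Int) (k start : Nat) (pre : List Char) (segs : List (List Char)),
    orig.drop start = pre ++ cs → pre.length + start = k →
    (pvPts d k cs).foldl
      (fun (st : List (List Char) × Int) p =>
        (st.1 ++ [PySem.Chars.strip (PySem.List.slice orig (some st.2) (some p))], p + 1))
      (segs, (start : Int))
    = (segs ++ (pvInit (pre ++ (pvSegs d cs).1) (pvSegs d cs).2).map PySem.Chars.strip,
       (let fin := (pvPts d k cs).foldl
          (fun (st : List (List Char) × Int) p =>
            (st.1 ++ [PySem.Chars.strip (PySem.List.slice orig (some st.2) (some p))], p + 1))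
          (segs, (start : Int));
        fin.2))
    ∧ ∃ st' : Nat,
        ((pvPts d k cs).foldl
          (fun (st : List (List Char) × Int) p =>
            (st.1 ++ [PySem.Chars.strip (PySem.List.slice orig (some st.2) (some p))], p + 1))
          (segs, (start : Int))).2 = (st' : Int)
        ∧ orig.drop st' = pvLast (pre ++ (pvSegs d cs).1) (pvSegs d cs).2 := by
  induction cs with
  | nil =>
    intro d k start pre segs hdrop hlen
    refine ⟨by simp [pvPts, pvSegs, pvInit], start, by simp [pvPts], ?_⟩
    simpa [pvSegs, pvLast] using hdrop
  | cons c cs ih =>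
    intro d k start pre segs hdrop hlen
    by_cases hc : c = ',' ∧ d = 0
    · obtain ⟨hc1, hc2⟩ := hc; subst hc1; subst hc2
      have hpts : pvPts 0 k (',' :: cs) = (k : Int) :: pvPts 0 (k + 1) cs := by
        simp [pvPts]
      have hslice : PySem.List.slice orig (some (start : Int)) (some (k : Int))
          = pre := by
        rw [PySem.List.slice_natCast]
        have hks : k - start = pre.length := by omega
        rw [hks, hdrop]
        simp
      have hdrop' : orig.drop (k + 1) = cs := by
        have : orig.drop (k + 1) = (orig.drop start).drop (pre.length + 1) := by
          rw [List.drop_drop]; congr 1; omega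
        rw [this, hdrop]
        have h2 : pre ++ ',' :: cs = (pre ++ [',']) ++ cs := by simp
        have h3 : pre.length + 1 = (pre ++ [',']).length := by simp
        rw [h2, h3, List.drop_left]
      have hk1 : (k : Int) + 1 = ((k + 1 : Nat) : Int) := by push_cast; ring
      obtain ⟨h1, st', hst', hlast⟩ :=
        ih 0 (k + 1) (k + 1) [] (segs ++ [PySem.Chars.strip pre]) (by simpa using hdrop') (by simp)
      rw [hpts]
      simp only [List.foldl_cons, hslice, hk1]
      refine ⟨?_, st', ?_, ?_⟩
      · rw [h1]; simp [pvSegs, pvInit]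
      · exact hst'
      · rw [hlast]; simp [pvSegs, pvLast]
    · have hpts : pvPts d k (c :: cs) = pvPts (pvUpd c d) (k + 1) cs := by
        simp [pvPts, hc]
      have hdrop' : orig.drop start = (pre ++ [c]) ++ cs := by
        rw [hdrop]; simp
      obtain ⟨h1, st', hst', hlast⟩ :=
        ih (pvUpd c d) (k + 1) start (pre ++ [c]) segs hdrop' (by simp; omega)
      rw [hpts]
      refine ⟨?_, st', hst', ?_⟩
      · rw [h1]
        have : pvSegs d (c :: cs) = (c :: (pvSegs (pvUpd c d) cs).1, (pvSegs (pvUpd c d) cs).2) := by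
          rw [pvSegs, if_neg hc]
        simp [this]
      · rw [hlast]
        have : pvSegs d (c :: cs) = (c :: (pvSegs (pvUpd c d) cs).1, (pvSegs (pvUpd c d) cs).2) := by
          rw [pvSegs, if_neg hc]
        simp [this]

-- ===== VERDICT (by name: the statement is the Claim_ definition above) =====
theorem split_titles_spec : Claim_equal_split_titles := by
  unfold Claim_equal_split_titles Spec_split_titles
  intro s _
  simp only [split_titles, split_titles_alt]
  have hA := lemA s.toList 0 [] []
  have hP := lemP s.toList 0 0 []
  have hS := lemS s.toList s.toList 0 0 0 [] [] (by simp) (by simp)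
  simp only [Nat.cast_zero] at hP hS
  rw [hA, hP]
  simp only [List.nil_append]
  obtain ⟨h1, st', hst', hlast⟩ := hS
  rw [h1, hst', PySem.List.slice_from_natCast, hlast]
  by_cases hne : PySem.Chars.strip (pvLast (pvSegs 0 s.toList).1 (pvSegs 0 s.toList).2) = []
  · simp [hne]
  · simp [hne]
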